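-- pv_equiv track=rewrite | github.com/febinv/DS_ALGO | uniquestringchar.py | uniquestringchar
-- ===== SOURCE A (Python) =====
-- def uniquestringchar(n):
--     check={}
--     mylist=[]
--     for i in range(len(n)):
--         if n[i] not in check:
--             check[n[i]]=1
--         else:
--             mylist.append(n[i])
--     if len(mylist)!=0:
--         return 1
--     else:
--         return 0
-- ===== SOURCE B (Python) =====
-- def uniquestringchar(n):
--     s = sorted(n)
--     for a, b in zip(s, s[1:]):
--         if a == b:
--             return 1
--     return 0
-- ===== Notes on version B (the rewrite author's own statement) =====
-- stated objective: alternative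
-- what changed: Replaces the hash-dict seen-set loop with duplicate accumulation by sorting the characters and scanning adjacent pairs for an equal neighbour, with early exit on the first duplicate.
import Mathlib
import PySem

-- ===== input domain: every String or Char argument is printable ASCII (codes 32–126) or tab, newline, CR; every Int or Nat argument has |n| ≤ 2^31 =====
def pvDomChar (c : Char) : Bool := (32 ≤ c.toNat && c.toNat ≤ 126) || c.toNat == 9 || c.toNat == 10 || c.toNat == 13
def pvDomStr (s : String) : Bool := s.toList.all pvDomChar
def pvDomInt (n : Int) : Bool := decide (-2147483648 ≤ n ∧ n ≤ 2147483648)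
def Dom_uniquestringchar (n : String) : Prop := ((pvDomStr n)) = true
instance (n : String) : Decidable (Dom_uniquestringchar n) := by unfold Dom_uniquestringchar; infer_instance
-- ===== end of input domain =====

-- B replaces A's seen-dict loop (with duplicate accumulation) by sorting the characters
-- and scanning adjacent pairs for an equal neighbour (objective: alternative algorithm).

-- ===== PORT A =====
-- A's loop over i in range(len(n)) reads n[i] in order; ported as a fold over the
-- characters in order with the same state (check dict, mylist).
def uniquestringcharLoop (cs : List Char) (check : PySem.Dict Char Int)
    (mylist : List Char) : PySem.Dict Char Int × List Char :=
  cs.foldl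
    (fun st c =>
      if st.1.contains c = false then (st.1.insert c 1, st.2)
      else (st.1, st.2 ++ [c]))
    (check, mylist)

def uniquestringchar (n : String) : Int :=
  let st := uniquestringcharLoop n.toList PySem.Dict.empty []
  if st.2.length ≠ 0 then 1 else 0

-- ===== PORT B =====
-- Source B's 'for a, b in zip(s, s[1:]): if a == b: return 1' is the adjacent-pair scan
-- with early exit; transcribed as this structural recursion on the sorted list.
def uniquestringcharAdjDup : List Char → Bool
  | a :: b :: t => if a = b then true else uniquestringcharAdjDup (b :: t)
  | _ => false

def uniquestringchar_alt (n : String) : Int :=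
  let s := PySem.List.sorted n.toList (fun x => x) false
  if uniquestringcharAdjDup s then 1 else 0

-- ===== PRECONDITION & SPEC =====
def Spec_uniquestringchar (n : String) (out : Int) : Prop := out = uniquestringchar_alt n
instance (n : String) (out : Int) : Decidable (Spec_uniquestringchar n out) := by unfold Spec_uniquestringchar; infer_instance

-- ===== CLAIM (what is proved, stated in full; the proofs are below) =====
def Claim_equal_uniquestringchar : Prop := ∀ (n : String), Dom_uniquestringchar n → Spec_uniquestringchar n (uniquestringchar n)

-- ===== LEMMAS AND PROOFS =====

-- Unfolding step of A's loop.
theorem uniquestringcharLoop_cons (c : Char) (cs : List Char)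
    (d : PySem.Dict Char Int) (acc : List Char) :
    uniquestringcharLoop (c :: cs) d acc
      = if d.contains c = false then uniquestringcharLoop cs (d.insert c 1) acc
        else uniquestringcharLoop cs d (acc ++ [c]) := by
  by_cases h : d.contains c = false <;>
    simp [uniquestringcharLoop, h]

-- Invariant: the duplicate list grows by exactly the characters that do not enlarge the key set.
theorem uniquestringcharLoop_length (cs : List Char) :
    ∀ (d : PySem.Dict Char Int) (acc : List Char),
      (uniquestringcharLoop cs d acc).2.length + (PySem.Set.update d.keys cs).length
        = acc.length + d.keys.length + cs.length := by
  induction cs with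
  | nil => intro d acc; simp [uniquestringcharLoop, PySem.Set.update]
  | cons c cs ih =>
    intro d acc
    rw [uniquestringcharLoop_cons]
    by_cases h : d.contains c = false
    · have hmem : c ∉ d.keys := by
        intro hm
        rw [(PySem.Dict.contains_iff_mem_keys d c).mpr hm] at h
        simp at h
      rw [if_pos h]
      have hthis := ih (d.insert c 1) acc
      rw [PySem.Dict.keys_insert_of_not_contains d 1 h] at hthis
      have hupd : PySem.Set.update d.keys (c :: cs)
          = PySem.Set.update (d.keys ++ [c]) cs := by
        simp [PySem.Set.update, PySem.Set.add, PySem.Set.contains, hmem]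
      rw [hupd]
      simp only [List.length_append, List.length_cons, List.length_nil] at hthis ⊢
      omega
    · rw [if_neg h]
      have hmem : c ∈ d.keys := by
        apply (PySem.Dict.contains_iff_mem_keys d c).mp
        simpa using h
      have hthis := ih d (acc ++ [c])
      have hupd : PySem.Set.update d.keys (c :: cs) = PySem.Set.update d.keys cs := by
        simp [PySem.Set.update, PySem.Set.add, PySem.Set.contains, hmem]
      rw [hupd]
      simp only [List.length_append, List.length_cons, List.length_nil] at hthis ⊢
      omega

theorem uniquestringcharLoop_len_eq (cs : List Char) :
    (uniquestringcharLoop cs PySem.Dict.empty []).2.length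
      + (PySem.Set.ofList cs).length = cs.length := by
  have h := uniquestringcharLoop_length cs PySem.Dict.empty []
  simpa [PySem.Dict.keys_empty, PySem.Set.update, PySem.Set.ofList_eq_foldl] using h

-- The cardinality of set(cs) equals |cs| exactly on duplicate-free lists.
theorem ofList_length_eq_iff_nodup (cs : List Char) :
    (PySem.Set.ofList cs).length = cs.length ↔ cs.Nodup := by
  constructor
  · intro h
    induction cs with
    | nil => simp
    | cons c cs ih =>
      rw [PySem.Set.ofList_cons] at h
      have hd : (PySem.Set.discard (PySem.Set.ofList cs) c).length
          ≤ (PySem.Set.ofList cs).length := by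
        simp [PySem.Set.discard]
        exact List.length_filter_le _ _
      have hle := PySem.Set.length_ofList_le (xs := cs)
      simp only [List.length_cons] at h
      have hlen : (PySem.Set.discard (PySem.Set.ofList cs) c).length = cs.length := by omega
      have hofl : (PySem.Set.ofList cs).length = cs.length := by omega
      have hnd := ih hofl
      refine List.nodup_cons.mpr ⟨?_, hnd⟩
      intro hmemc
      have hmem : c ∈ PySem.Set.ofList cs := (PySem.Set.mem_ofList cs c).mpr hmemc
      have : (PySem.Set.discard (PySem.Set.ofList cs) c).length
          < (PySem.Set.ofList cs).length := by
        simp only [PySem.Set.discard]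
        refine List.length_filter_lt_length_iff_exists.mpr ?_
        exact ⟨c, hmem, by simp⟩
      omega
  · intro h
    rw [PySem.Set.ofList_eq_self_of_nodup cs h]

-- A returns 1 exactly on strings with a repeated character.
theorem uniquestringchar_eq (n : String) :
    uniquestringchar n = if n.toList.Nodup then 0 else 1 := by
  unfold uniquestringchar
  have h := uniquestringcharLoop_len_eq n.toList
  have hle := PySem.Set.length_ofList_le (xs := n.toList)
  by_cases hn : n.toList.Nodup
  · have := (ofList_length_eq_iff_nodup n.toList).mpr hn
    simp only [hn, if_true]
    have : (uniquestringcharLoop n.toList PySem.Dict.empty []).2.length = 0 := by omega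
    simp [this]
  · have hne : (PySem.Set.ofList n.toList).length ≠ n.toList.length := fun hc =>
      hn ((ofList_length_eq_iff_nodup n.toList).mp hc)
    simp only [hn, if_false]
    have : (uniquestringcharLoop n.toList PySem.Dict.empty []).2.length ≠ 0 := by omega
    simp [this]

-- On a weakly increasing list, an equal adjacent pair exists exactly when the list has a duplicate.
theorem adjDup_iff_not_nodup : ∀ (s : List Char), s.Pairwise (· ≤ ·) →
    (uniquestringcharAdjDup s = true ↔ ¬ s.Nodup)
  | [] => by simp [uniquestringcharAdjDup]
  | [a] => by simp [uniquestringcharAdjDup]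
  | a :: b :: t => by
    intro hp
    obtain ⟨ha, hp'⟩ := List.pairwise_cons.mp hp
    have hab : a ≤ b := ha b (by simp)
    have hbt : ∀ x ∈ t, b ≤ x := fun x hx => (List.pairwise_cons.mp hp').1 x hx
    have ih := adjDup_iff_not_nodup (b :: t) hp'
    by_cases hEq : a = b
    · simp [uniquestringcharAdjDup, hEq, List.nodup_cons]
    · simp only [uniquestringcharAdjDup, if_neg hEq, ih]
      constructor
      · intro hnd hc
        exact hnd (List.nodup_cons.mp hc).2
      · intro hc hnd
        -- a ∉ b :: t: a ≠ b, and a ∈ t would force b ≤ a, hence a = b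
        have hnotmem : a ∉ b :: t := by
          intro hmem
          rcases List.mem_cons.mp hmem with h1 | h2
          · exact hEq h1
          · exact hEq (le_antisymm hab (hbt a h2))
        exact hc (List.nodup_cons.mpr ⟨hnotmem, hnd⟩)

-- ===== VERDICT (by name: the statement is the Claim_ definition above) =====
theorem uniquestringchar_spec : Claim_equal_uniquestringchar := by
  intro n _
  unfold Spec_uniquestringchar
  rw [uniquestringchar_eq]
  show (if n.toList.Nodup then (0:Int) else 1)
      = if uniquestringcharAdjDup (PySem.List.sorted n.toList (fun x => x) false) then 1 else 0
  have hperm := PySem.List.sorted_perm (xs := n.toList) (key := fun x : Char => x) (rev := false)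
  have hpair := PySem.List.sorted_pairwise (xs := n.toList) (key := fun x : Char => x)
  have hiff := adjDup_iff_not_nodup _ hpair
  have hnodup : (PySem.List.sorted n.toList (fun x => x) false).Nodup ↔ n.toList.Nodup :=
    hperm.nodup_iff
  by_cases hn : n.toList.Nodup
  · have : uniquestringcharAdjDup (PySem.List.sorted n.toList (fun x => x) false) ≠ true :=
      fun hc => (hiff.mp hc) (hnodup.mpr hn)
    simp [hn, this]
  · have : uniquestringcharAdjDup (PySem.List.sorted n.toList (fun x => x) false) = true := by
      exact hiff.mpr (fun hc => hn (hnodup.mp hc))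
    simp [hn, this]
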